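-- pv_equiv track=rewrite | github.com/ravescovi/bAIt | scripts/check-submodule-access.py | categorize_submodules
-- ===== SOURCE A (Python) =====
-- from typing import Dict, List, Tuple
--
-- def categorize_submodules(submodules: Dict[str, str]) -> Dict[str, List[str]]:
--     """
--     Categorize submodules by directory.
--
--     Args:
--         submodules: Dictionary of submodule path to URL
--
--     Returns:
--         Dictionary of category to list of paths
--     """
--     categories = {
--         "bits_base": [],
--         "bits_deployments": [],
--         "nsls_deployments": [],
--         "resources": [],
--         "containers": [],
--         "other": []
--     }
--
--     for path in submodules.keys():
--         if path.startswith("bits_base/"):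
--             categories["bits_base"].append(path)
--         elif path.startswith("bits_deployments/"):
--             categories["bits_deployments"].append(path)
--         elif path.startswith("nsls_deployments/"):
--             categories["nsls_deployments"].append(path)
--         elif path.startswith("resources/"):
--             categories["resources"].append(path)
--         elif path.startswith("containers/"):
--             categories["containers"].append(path)
--         else:
--             categories["other"].append(path)
--
--     return categories
-- ===== SOURCE B (Python) =====
-- def categorize_submodules(submodules):
--     """Categorize submodules by directory (prefix table + per-category comprehensions)."""
--     table = [
--         ("bits_base/", "bits_base"),
--         ("bits_deployments/", "bits_deployments"),
--         ("nsls_deployments/", "nsls_deployments"),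
--         ("resources/", "resources"),
--         ("containers/", "containers"),
--     ]
--
--     def category(path):
--         for prefix, cat in table:
--             if path.startswith(prefix):
--                 return cat
--         return "other"
--
--     paths = list(submodules.keys())
--     return {cat: [p for p in paths if category(p) == cat]
--             for cat in ["bits_base", "bits_deployments", "nsls_deployments",
--                         "resources", "containers", "other"]}
-- ===== Notes on version B (the rewrite author's own statement) =====
-- stated objective: idiomatic
-- what changed: Replaces the single-pass if/elif chain that mutates a pre-seeded dict with a data-driven prefix table plus a classifier function, building the result as a dict comprehension of per-category list comprehensions.
import Mathlib
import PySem

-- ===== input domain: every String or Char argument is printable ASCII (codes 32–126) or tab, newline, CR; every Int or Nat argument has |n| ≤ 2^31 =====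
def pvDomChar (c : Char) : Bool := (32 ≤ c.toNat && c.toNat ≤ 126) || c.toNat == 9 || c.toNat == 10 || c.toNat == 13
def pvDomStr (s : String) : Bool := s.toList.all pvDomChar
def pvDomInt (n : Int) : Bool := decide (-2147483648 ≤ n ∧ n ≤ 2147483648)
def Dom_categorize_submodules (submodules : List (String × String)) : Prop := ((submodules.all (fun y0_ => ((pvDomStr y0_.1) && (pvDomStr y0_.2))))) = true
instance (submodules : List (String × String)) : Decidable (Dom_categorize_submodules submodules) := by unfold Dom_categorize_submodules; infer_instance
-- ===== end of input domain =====

-- B replaces the if/elif chain mutating a pre-seeded dict by a prefix table with a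
-- classifier function and per-category list comprehensions (idiomatic restructuring).

-- ===== PORT A =====
-- the pre-seeded categories dict
def pvCatsInit : PySem.Dict String (List String) :=
  PySem.Dict.mk [("bits_base", []), ("bits_deployments", []), ("nsls_deployments", []),
                 ("resources", []), ("containers", []), ("other", [])]

-- the body of A's for-loop
def pvStepA (d : PySem.Dict String (List String)) (p : String × String) :
    PySem.Dict String (List String) :=
  let path := p.1
  if PySem.Str.startswith path "bits_base/" then d.modify "bits_base" [] (· ++ [path])
  else if PySem.Str.startswith path "bits_deployments/" then d.modify "bits_deployments" [] (· ++ [path])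
  else if PySem.Str.startswith path "nsls_deployments/" then d.modify "nsls_deployments" [] (· ++ [path])
  else if PySem.Str.startswith path "resources/" then d.modify "resources" [] (· ++ [path])
  else if PySem.Str.startswith path "containers/" then d.modify "containers" [] (· ++ [path])
  else d.modify "other" [] (· ++ [path])

def categorize_submodules (submodules : List (String × String)) : List (String × List String) :=
  (submodules.foldl pvStepA pvCatsInit).items

-- ===== PORT B =====
def pvTable : List (String × String) :=
  [("bits_base/", "bits_base"), ("bits_deployments/", "bits_deployments"),
   ("nsls_deployments/", "nsls_deployments"), ("resources/", "resources"),
   ("containers/", "containers")]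

-- the inner 'category' loop of B: first matching prefix wins, default "other"
def pvCategory (path : String) : List (String × String) → String
  | [] => "other"
  | pc :: rest => if PySem.Str.startswith path pc.1 then pc.2 else pvCategory path rest

def categorize_submodules_alt (submodules : List (String × String)) : List (String × List String) :=
  let paths := submodules.map (·.1)
  ["bits_base", "bits_deployments", "nsls_deployments", "resources", "containers", "other"].map
    (fun cat => (cat, paths.filter (fun p => pvCategory p pvTable == cat)))

-- ===== PRECONDITION & SPEC =====
def Spec_categorize_submodules (submodules : List (String × String)) (out : List (String × List String)) : Prop := out = categorize_submodules_alt submodules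
instance (submodules : List (String × String)) (out : List (String × List String)) : Decidable (Spec_categorize_submodules submodules out) := by unfold Spec_categorize_submodules; infer_instance

-- ===== CLAIM (what is proved, stated in full; the proofs are below) =====
def Claim_equal_categorize_submodules : Prop := ∀ (submodules : List (String × String)), Dom_categorize_submodules submodules → Spec_categorize_submodules submodules (categorize_submodules submodules)

-- ===== LEMMAS AND PROOFS =====

-- a general 6-list state of A's loop
def pvMkD (a b c d e f : List String) : PySem.Dict String (List String) :=
  PySem.Dict.mk [("bits_base", a), ("bits_deployments", b), ("nsls_deployments", c),
                 ("resources", d), ("containers", e), ("other", f)]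

-- selection predicate on pairs: does B classify p.1 into category c?
def pvSel (c : String) (p : String × String) : Bool := pvCategory p.1 pvTable == c

-- one step of A's loop on the general state, expressed via B's classifier
set_option maxHeartbeats 1000000 in
theorem pvStepA_mk (x : String × String) (a b c d e f : List String) :
    pvStepA (pvMkD a b c d e f) x
      = pvMkD (a ++ if pvSel "bits_base" x then [x.1] else [])
              (b ++ if pvSel "bits_deployments" x then [x.1] else [])
              (c ++ if pvSel "nsls_deployments" x then [x.1] else [])
              (d ++ if pvSel "resources" x then [x.1] else [])
              (e ++ if pvSel "containers" x then [x.1] else [])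
              (f ++ if pvSel "other" x then [x.1] else []) := by
  simp only [pvStepA, pvSel, pvCategory, pvTable]
  split_ifs <;>
  simp_all [pvMkD, PySem.Dict.modify, PySem.Dict.contains, PySem.Dict.insert,
            PySem.Dict.getD, PySem.Dict.get?]

-- loop invariant for A's fold, with a fully general 6-list state
theorem pvFold_inv (xs : List (String × String)) (a b c d e f : List String) :
    xs.foldl pvStepA (pvMkD a b c d e f)
    = pvMkD (a ++ (xs.filter (pvSel "bits_base")).map (·.1))
            (b ++ (xs.filter (pvSel "bits_deployments")).map (·.1))
            (c ++ (xs.filter (pvSel "nsls_deployments")).map (·.1))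
            (d ++ (xs.filter (pvSel "resources")).map (·.1))
            (e ++ (xs.filter (pvSel "containers")).map (·.1))
            (f ++ (xs.filter (pvSel "other")).map (·.1)) := by
  induction xs generalizing a b c d e f with
  | nil => simp
  | cons x xs ih =>
    rw [List.foldl_cons, pvStepA_mk, ih]
    by_cases h1 : pvSel "bits_base" x = true <;>
    by_cases h2 : pvSel "bits_deployments" x = true <;>
    by_cases h3 : pvSel "nsls_deployments" x = true <;>
    by_cases h4 : pvSel "resources" x = true <;>
    by_cases h5 : pvSel "containers" x = true <;>
    by_cases h6 : pvSel "other" x = true <;>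
    simp [h1, h2, h3, h4, h5, h6]

-- filtering the mapped paths = mapping the filtered pairs
theorem pvFilter_map_paths (xs : List (String × String)) (cat : String) :
    (xs.map (·.1)).filter (fun p => pvCategory p pvTable == cat)
      = (xs.filter (pvSel cat)).map (·.1) := by
  rw [List.filter_map]; rfl

-- ===== VERDICT (by name: the statement is the Claim_ definition above) =====
theorem categorize_submodules_spec : Claim_equal_categorize_submodules := by
  intro subs _
  show categorize_submodules subs = categorize_submodules_alt subs
  unfold categorize_submodules categorize_submodules_alt
  rw [show pvCatsInit = pvMkD [] [] [] [] [] [] from rfl, pvFold_inv]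
  simp [pvMkD, pvFilter_map_paths]
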